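-- pv_equiv track=rewrite | github.com/enitram/charge_assign | charge/nauty.py | __make_partition
-- ===== SOURCE A (Python) =====
-- from itertools import groupby
-- from typing import Any, Dict, Tuple, List
--
-- Color = Tuple[bool, str]
--
-- Partition = List[Tuple[Color, List[int]]]
--
-- def __make_partition(
--
--         nodes: List[Any],
--         node_colors: List[Color],
--         node_to_index: Dict[Any, int]
--         ) -> Partition:
--     """Organises atoms by color, for passing to dreadnaut.
--
--     Args:
--         nodes: A list of graph nodes.
--         node_colors: A list of corresponding node colors.
--         node_to_index: A map from graph nodes to their indexes.
--
--     Returns: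
--         A list of groups of node indexes, grouped and sorted by \
--                 color.
--     """
--     def by_color(node_and_color: Tuple[int, Color]) -> Color:
--         return node_and_color[1]
--
--     def get_node(node_and_color: Tuple[int, Color]) -> int:
--         return node_and_color[0]
--
--     colored_nauty_nodes = list()
--     for node_id, color in enumerate(node_colors):
--         colored_nauty_nodes.append((node_to_index[nodes[node_id]], color))
--
--     colored_nauty_nodes.sort(key=by_color)
--
--     partition = list()
--     for color, node_and_colors in groupby(colored_nauty_nodes, key=by_color):
--         nauty_ids = sorted(map(get_node, node_and_colors))
--         partition.append((color, nauty_ids))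
--
--     return partition
-- ===== SOURCE B (Python) =====
-- def __make_partition(nodes, node_colors, node_to_index):
--     """Group node indexes by color via a dict built in one pass, then emit
--     colors in sorted order with each group's indexes sorted."""
--     groups = {}
--     for node_id, color in enumerate(node_colors):
--         groups.setdefault(color, []).append(node_to_index[nodes[node_id]])
--     return [(color, sorted(groups[color])) for color in sorted(groups)]
-- ===== Notes on version B (the rewrite author's own statement) =====
-- stated objective: idiomatic
-- what changed: Replaces A's build-list / global stable sort by color / itertools.groupby pipeline with a single dict-grouping pass over enumerate(node_colors) (setdefault-append) followed by one pass over the sorted distinct colors, sorting each group once.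
import Mathlib
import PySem

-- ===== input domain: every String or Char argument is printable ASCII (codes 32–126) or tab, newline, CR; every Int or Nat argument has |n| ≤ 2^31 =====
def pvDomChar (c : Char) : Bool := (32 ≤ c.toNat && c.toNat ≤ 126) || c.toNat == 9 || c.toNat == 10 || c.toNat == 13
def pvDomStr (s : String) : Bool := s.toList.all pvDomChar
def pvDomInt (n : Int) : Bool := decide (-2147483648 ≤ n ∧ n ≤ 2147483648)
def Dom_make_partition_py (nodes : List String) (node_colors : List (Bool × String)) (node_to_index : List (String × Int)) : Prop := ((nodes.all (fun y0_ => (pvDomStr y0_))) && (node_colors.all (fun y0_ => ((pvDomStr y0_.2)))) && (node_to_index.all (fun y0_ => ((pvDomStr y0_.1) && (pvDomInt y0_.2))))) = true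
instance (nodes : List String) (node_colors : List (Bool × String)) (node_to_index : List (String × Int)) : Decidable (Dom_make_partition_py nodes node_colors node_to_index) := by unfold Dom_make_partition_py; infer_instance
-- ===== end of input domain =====

-- B replaces A's global stable sort + itertools.groupby by a dict grouping pass over
-- enumerate(node_colors) followed by one pass over the sorted distinct colors (objective: idiomatic).

-- ===== PORT A =====
-- itertools.groupby(l, key) as A consumes it: maximal runs of equal key, key = the color (second component)
def pvGroupby : List (Int × (Bool × String)) → List ((Bool × String) × List (Int × (Bool × String)))
  | [] => []
  | x :: xs =>
      (x.2, x :: xs.takeWhile (fun y => y.2 == x.2)) :: pvGroupby (xs.dropWhile (fun y => y.2 == x.2))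
  termination_by l => l.length
  decreasing_by
    simp only [List.length_cons]
    exact Nat.lt_succ_of_le (List.length_dropWhile_le _ _)

def make_partition_py (nodes : List String) (node_colors : List (Bool × String)) (node_to_index : List (String × Int)) : List ((Bool × String) × List Int) :=
  let colored := (PySem.List.enumerate node_colors).foldl
      (fun acc p => acc ++ [((PySem.Dict.ofList node_to_index).getD (PySem.List.pyGetD nodes p.1 "") 0, p.2)]) []
  let s := PySem.List.sorted2 colored (fun q => q.2.1) (fun q => q.2.2)
  (pvGroupby s).foldl
      (fun part g => part ++ [(g.1, PySem.List.sorted (g.2.map (fun q => q.1)) (fun v => v))]) []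

-- ===== PORT B =====
def make_partition_py_alt (nodes : List String) (node_colors : List (Bool × String)) (node_to_index : List (String × Int)) : List ((Bool × String) × List Int) :=
  let d0 := PySem.Dict.ofList node_to_index
  let groups := (PySem.List.enumerate node_colors).foldl
      (fun g p => g.modify p.2 [] (fun l => l ++ [d0.getD (PySem.List.pyGetD nodes p.1 "") 0]))
      PySem.Dict.empty
  (PySem.List.sorted2 groups.keys (fun c => c.1) (fun c => c.2)).map
      (fun c => (c, PySem.List.sorted (groups.getD c []) (fun v => v)))

-- ===== PRECONDITION & SPEC =====
-- Pre_ excludes exactly the inputs where Python A raises: an index beyond nodes (IndexError)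
-- or a node without an entry in node_to_index (KeyError).
def Pre_make_partition_py (nodes : List String) (node_colors : List (Bool × String)) (node_to_index : List (String × Int)) : Prop :=
  node_colors.length ≤ nodes.length ∧
    ∀ s ∈ nodes.take node_colors.length, s ∈ node_to_index.map Prod.fst
instance (nodes : List String) (node_colors : List (Bool × String)) (node_to_index : List (String × Int)) : Decidable (Pre_make_partition_py nodes node_colors node_to_index) := by unfold Pre_make_partition_py; infer_instance
def pvWitness_make_partition_py : List String × (List (Bool × String)) × (List (String × Int)) :=
  (["a", "b"], [(true, "r"), (false, "g")], [("a", 3), ("b", 1)])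

def Spec_make_partition_py (nodes : List String) (node_colors : List (Bool × String)) (node_to_index : List (String × Int)) (out : List ((Bool × String) × List Int)) : Prop := out = make_partition_py_alt nodes node_colors node_to_index
instance (nodes : List String) (node_colors : List (Bool × String)) (node_to_index : List (String × Int)) (out : List ((Bool × String) × List Int)) : Decidable (Spec_make_partition_py nodes node_colors node_to_index out) := by unfold Spec_make_partition_py; infer_instance

-- ===== CLAIM (what is proved, stated in full; the proofs are below) =====
def Claim_equal_make_partition_py : Prop := ∀ (nodes : List String) (node_colors : List (Bool × String)) (node_to_index : List (String × Int)), Dom_make_partition_py nodes node_colors node_to_index → Pre_make_partition_py nodes node_colors node_to_index → Spec_make_partition_py nodes node_colors node_to_index (make_partition_py nodes node_colors node_to_index)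

-- ===== LEMMAS AND PROOFS =====

theorem pv_sorted2_eq_sorted_toLex {α : Type} (xs : List α) (k : α → Bool × String) :
    PySem.List.sorted2 xs (fun a => (k a).1) (fun a => (k a).2)
      = PySem.List.sorted xs (fun a => toLex (k a)) := by
  unfold PySem.List.sorted2 PySem.List.sorted
  simp only [Bool.false_eq_true, if_false]
  congr 1
  funext acc x
  congr 1
  funext a b
  rcases lt_trichotomy (k a).1 (k b).1 with h | h | h
  · simp [Prod.Lex.toLex_lt_toLex, h]
  · simp [Prod.Lex.toLex_lt_toLex, h]
  · simp [Prod.Lex.toLex_lt_toLex, h, asymm h]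
    intro h'
    exact absurd h' (ne_of_gt h)

theorem pv_discard_of_not_mem {α : Type} [BEq α] [LawfulBEq α] (s : List α) (k : α)
    (h : k ∉ s) : PySem.Set.discard s k = s := by
  simp only [PySem.Set.discard]
  apply List.filter_eq_self.2
  intro y hy
  simp only [Bool.not_eq_eq_eq_not, Bool.not_true, beq_eq_false_iff_ne]
  rintro rfl; exact h hy

theorem pv_discard_ofList_append {α : Type} [BEq α] [LawfulBEq α] (l₁ l₂ : List α) (k : α)
    (h1 : ∀ y ∈ l₁, y = k) (h2 : k ∉ l₂) :
    PySem.Set.discard (PySem.Set.ofList (l₁ ++ l₂)) k = PySem.Set.ofList l₂ := by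
  induction l₁ with
  | nil =>
      simp only [List.nil_append]
      exact pv_discard_of_not_mem _ k (by simp [PySem.Set.mem_ofList]; exact h2)
  | cons y t ih =>
      have hy : y = k := h1 y (by simp)
      subst hy
      rw [List.cons_append, PySem.Set.ofList_cons]
      have ih' := ih (fun z hz => h1 z (by simp [hz]))
      simp only [PySem.Set.discard] at ih' ⊢
      rw [List.filter_cons]
      simp only [beq_self_eq_true, Bool.not_true, Bool.false_eq_true, if_false]
      rw [List.filter_filter]
      simpa [Bool.and_self] using ih'

theorem pv_ofList_cons_append {α : Type} [BEq α] [LawfulBEq α] (l₁ l₂ : List α) (k : α)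
    (h1 : ∀ y ∈ l₁, y = k) (h2 : k ∉ l₂) :
    PySem.Set.ofList (k :: (l₁ ++ l₂)) = k :: PySem.Set.ofList l₂ := by
  rw [PySem.Set.ofList_cons, pv_discard_ofList_append l₁ l₂ k h1 h2]

theorem pv_groupby_sorted (l : List (Int × (Bool × String)))
    (h : l.Pairwise (fun a b => toLex a.2 ≤ toLex b.2)) :
    pvGroupby l
      = (PySem.Set.ofList (l.map (fun q => q.2))).map
          (fun c => (c, l.filter (fun q => q.2 == c))) := by
  induction l using pvGroupby.induct with
  | case1 => simp [pvGroupby, PySem.Set.ofList]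
  | case2 x xs ih =>
      rw [List.pairwise_cons] at h
      obtain ⟨hx, hxs⟩ := h
      set p : (Int × (Bool × String)) → Bool := fun y => y.2 == x.2 with hp
      set take := xs.takeWhile p with htakedef
      set drop := xs.dropWhile p with hdropdef
      have htake : ∀ y ∈ take, y.2 = x.2 := by
        intro y hy
        have := List.mem_takeWhile_imp hy
        simpa [hp, beq_iff_eq] using this
      have hdropsub : drop.Sublist xs := hdropdef ▸ List.dropWhile_sublist p
      have hdrop_lt : ∀ y ∈ drop, toLex x.2 < toLex y.2 := by
        rcases heq : drop with _ | ⟨d, ds⟩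
        · simp
        · have hdfalse : p d = false := by
            have h0 := List.head?_dropWhile_not p xs
            rw [← hdropdef, heq] at h0
            simpa using h0
          have hdne : d.2 ≠ x.2 := by simpa [hp, beq_eq_false_iff_ne] using hdfalse
          have hdmem : d ∈ xs := hdropsub.mem (heq ▸ List.mem_cons_self)
          have hxd : toLex x.2 < toLex d.2 :=
            lt_of_le_of_ne (hx d hdmem) (by simpa using fun hcon => hdne (by simpa using hcon.symm))
          have hpw : (d :: ds).Pairwise (fun a b => toLex a.2 ≤ toLex b.2) := heq ▸ hxs.sublist hdropsub
          rw [List.pairwise_cons] at hpw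
          intro y hy
          rcases List.mem_cons.1 hy with rfl | hy
          · exact hxd
          · exact lt_of_lt_of_le hxd (hpw.1 y hy)
      have hdrop_ne : ∀ y ∈ drop, y.2 ≠ x.2 := by
        intro y hy hcon
        exact absurd (hcon ▸ hdrop_lt y hy) (lt_irrefl _)
      have hunfold : pvGroupby (x :: xs) = (x.2, x :: take) :: pvGroupby drop := by
        rw [pvGroupby, ← hp, ← htakedef, ← hdropdef]
      rw [hunfold]
      have hxs2 : xs = take ++ drop := (List.takeWhile_append_dropWhile (p := p) (l := xs)).symm
      rw [hxs2]
      have hmap : (x :: (take ++ drop)).map (fun q => q.2)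
          = x.2 :: (take.map (fun q => q.2) ++ drop.map (fun q => q.2)) := by
        simp
      have hof := pv_ofList_cons_append (take.map (fun q => q.2)) (drop.map (fun q => q.2)) x.2
            (by intro y hy; obtain ⟨z, hz, rfl⟩ := List.mem_map.1 hy; exact htake z hz)
            (by intro hmem; obtain ⟨z, hz, hzeq⟩ := List.mem_map.1 hmem; exact hdrop_ne z hz hzeq)
      rw [hmap]
      rw [hof]
      rw [List.map_cons]
      congr 1
      · have hfil : (x :: (take ++ drop)).filter (fun q => q.2 == x.2) = x :: take := by
          rw [List.filter_cons, List.filter_append]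
          simp only [beq_self_eq_true, if_true]
          rw [List.filter_eq_self.2 (by intro y hy; simpa [beq_iff_eq] using htake y hy),
              List.filter_eq_nil_iff.2 (by intro y hy; simpa [beq_iff_eq] using hdrop_ne y hy)]
          simp
        rw [hfil]
      · have hpwdrop : drop.Pairwise (fun a b => toLex a.2 ≤ toLex b.2) := hxs.sublist hdropsub
        rw [ih hpwdrop]
        apply List.map_congr_left
        intro c hc
        have hcne : c ≠ x.2 := by
          rw [PySem.Set.mem_ofList] at hc
          obtain ⟨z, hz, hzeq⟩ := List.mem_map.1 hc
          exact hzeq ▸ hdrop_ne z hz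
        have h1 : List.filter (fun q => q.2 == c) take = [] :=
          List.filter_eq_nil_iff.2 (fun y hy => by
            simp only [htake y hy, beq_iff_eq]
            exact fun hcon => hcne hcon.symm)
        congr 1
        rw [List.filter_cons, List.filter_append, h1]
        rw [if_neg (by simp only [beq_iff_eq]; exact fun hcon => hcne hcon.symm)]
        simp

theorem pv_ofList_sublist {α : Type} [BEq α] [LawfulBEq α] (xs : List α) :
    (PySem.Set.ofList xs).Sublist xs := by
  induction xs with
  | nil => simp [PySem.Set.ofList]
  | cons x t ih =>
      rw [PySem.Set.ofList_cons]
      refine List.Sublist.cons₂ x (List.Sublist.trans ?_ ih)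
      simp only [PySem.Set.discard]
      exact List.filter_sublist

theorem pv_filter_swap (l : List (Int × (Bool × String))) (c : Bool × String)
    (v : (Int × (Bool × String)) → Int) :
    ((l.map (fun p => (p.2, v p))).filter (fun q => q.1 == c)).map (fun q => q.2)
      = ((l.map (fun p => (v p, p.2))).filter (fun q => q.2 == c)).map (fun q => q.1) := by
  rw [List.filter_map, List.filter_map, List.map_map, List.map_map]
  rfl

theorem pv_core (l : List (Int × (Bool × String))) (v : (Int × (Bool × String)) → Int) :
    (pvGroupby (PySem.List.sorted2 (l.foldl (fun acc p => acc ++ [(v p, p.2)]) []) (fun q => q.2.1) (fun q => q.2.2))).foldl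
        (fun part g => part ++ [(g.1, PySem.List.sorted (g.2.map (fun q => q.1)) (fun w => w))]) []
      = (PySem.List.sorted2 (l.foldl (fun g p => g.modify p.2 [] (fun t => t ++ [v p])) PySem.Dict.empty).keys (fun c => c.1) (fun c => c.2)).map
          (fun c => (c, PySem.List.sorted ((l.foldl (fun g p => g.modify p.2 [] (fun t => t ++ [v p])) PySem.Dict.empty).getD c []) (fun w => w))) := by
  rw [PySem.List.foldl_append_singleton_eq_map (f := fun p => (v p, p.2)), List.nil_append]
  set pairs := l.map (fun p => (v p, p.2)) with hpairs
  rw [show PySem.List.sorted2 pairs (fun q => q.2.1) (fun q => q.2.2)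
        = PySem.List.sorted pairs (fun q => toLex q.2) from pv_sorted2_eq_sorted_toLex pairs (fun q => q.2)]
  set G := l.foldl (fun g p => g.modify p.2 [] (fun t => t ++ [v p])) PySem.Dict.empty with hGdef
  rw [show PySem.List.sorted2 G.keys (fun c => c.1) (fun c => c.2)
        = PySem.List.sorted G.keys (fun c => toLex c) from pv_sorted2_eq_sorted_toLex G.keys (fun c => c)]
  set s := PySem.List.sorted pairs (fun q => toLex q.2) with hs
  have hpw : s.Pairwise (fun a b => toLex a.2 ≤ toLex b.2) :=
    PySem.List.sorted_pairwise pairs (fun q => toLex q.2)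
  rw [pv_groupby_sorted s hpw]
  rw [PySem.List.foldl_append_singleton_eq_map, List.nil_append, List.map_map]
  -- B's dict
  have hG : G = (l.map (fun p => (p.2, v p))).foldl
      (fun d q => d.modify q.1 [] (fun t => t ++ [q.2])) PySem.Dict.empty := by
    rw [List.foldl_map]
  have hkeysG : G.keys = PySem.Set.ofList (l.map (fun p => p.2)) := by
    rw [hG, PySem.Dict.keys_foldl_modify_key, List.map_map]
    show PySem.Set.update [] (l.map fun p => p.2) = _
    exact PySem.Set.update_nil_left _
  have hgetD : ∀ c, G.getD c [] = (pairs.filter (fun q => q.2 == c)).map (fun q => q.1) := by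
    intro c
    rw [hG, PySem.Dict.getD_foldl_modify_append]
    simp only [PySem.Dict.getD_empty, List.nil_append]
    exact pv_filter_swap l c v
  have hmaps : pairs.map (fun q => q.2) = l.map (fun p => p.2) := by
    rw [hpairs, List.map_map]
    rfl
  have hperm : s.Perm pairs := PySem.List.sorted_perm pairs (fun q => toLex q.2) false
  -- the sorted distinct color lists agree
  have hkeys : PySem.Set.ofList (s.map (fun q => q.2))
      = PySem.List.sorted (PySem.Set.ofList (l.map (fun p => p.2))) (fun c => toLex c) := by
    apply Eq.symm
    apply PySem.List.sorted_eq_of_perm_of_pairwise_lt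
    · apply (List.perm_ext_iff_of_nodup (PySem.Set.nodup_ofList _) (PySem.Set.nodup_ofList _)).mpr
      intro a
      rw [PySem.Set.mem_ofList, PySem.Set.mem_ofList, ← hmaps]
      exact (hperm.map (fun q => q.2)).mem_iff
    · have hle : (s.map (fun q => q.2)).Pairwise (fun a b => toLex a ≤ toLex b) :=
        List.pairwise_map.mpr hpw
      have hsub : (PySem.Set.ofList (s.map (fun q => q.2))).Sublist (s.map (fun q => q.2)) :=
        pv_ofList_sublist _
      have hnd : (PySem.Set.ofList (s.map (fun q => q.2))).Nodup := PySem.Set.nodup_ofList _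
      have := (hle.sublist hsub).and hnd
      exact this.imp (fun h => lt_of_le_of_ne h.1 (fun hc => h.2 (toLex.injective hc)))
  rw [hkeys, hkeysG]
  apply List.map_congr_left
  intro c _
  have : (s.filter (fun q => q.2 == c)).Perm (pairs.filter (fun q => q.2 == c)) :=
    hperm.filter _
  rw [hgetD c]
  exact congrArg (fun t => (c, t))
    ((PySem.List.sorted_id_eq_sorted_id_iff_perm _ _).mpr (this.map (fun q => q.1)))
theorem pv_main (nodes : List String) (node_colors : List (Bool × String)) (node_to_index : List (String × Int)) :
    make_partition_py nodes node_colors node_to_index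
      = make_partition_py_alt nodes node_colors node_to_index := by
  unfold make_partition_py make_partition_py_alt
  exact pv_core (PySem.List.enumerate node_colors)
    (fun p => (PySem.Dict.ofList node_to_index).getD (PySem.List.pyGetD nodes p.1 "") 0)

-- ===== VERDICT (by name: the statement is the Claim_ definition above) =====
theorem make_partition_py_spec : Claim_equal_make_partition_py := by
  intro nodes node_colors node_to_index _ _
  unfold Spec_make_partition_py
  exact pv_main nodes node_colors node_to_index
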